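-- pv_equiv track=rewrite | github.com/Mitronios/IS101_zoo | zoo_dicts.py | ticket_value_and_type
-- ===== SOURCE A (Python) =====
-- ticket_menu = {
--     "Gratuita": {"precio": 0, "e_umbral": 3},
--     "Niños": {"precio": 14, "e_umbral": 13},
--     "Adultos": {"precio": 23, "e_umbral": 65},
--     "Jubilados": {"precio": 18, "e_umbral": float("inf")}
-- }
--
-- def ticket_value_and_type(age: int):
--     #Defino le precio de entrada
--     ticket_price = 0
--     ticket_type = 0
--     #Calculo el precio según la edad
--     for ticket_type in ticket_menu:
--         if age < ticket_menu[ticket_type]["e_umbral"]: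
--             ticket_price = ticket_menu[ticket_type]["precio"]
--             break
--
--     #Devuelvo el resultado
--     return ticket_price, ticket_type
-- ===== SOURCE B (Python) =====
-- def ticket_value_and_type(age: int):
--     # Rank the age: count how many thresholds it has reached, then index parallel tables.
--     idx = (age >= 3) + (age >= 13) + (age >= 65)
--     prices = (0, 14, 23, 18)
--     names = ("Gratuita", "Niños", "Adultos", "Jubilados")
--     return prices[idx], names[idx]
-- ===== Notes on version B (the rewrite author's own statement) =====
-- stated objective: alternative
-- what changed: Replaces the first-match scan over the nested dict by branch-free rank computation: the bucket index is the arithmetic sum of threshold comparisons, used to index two parallel tuples.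
import Mathlib
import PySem

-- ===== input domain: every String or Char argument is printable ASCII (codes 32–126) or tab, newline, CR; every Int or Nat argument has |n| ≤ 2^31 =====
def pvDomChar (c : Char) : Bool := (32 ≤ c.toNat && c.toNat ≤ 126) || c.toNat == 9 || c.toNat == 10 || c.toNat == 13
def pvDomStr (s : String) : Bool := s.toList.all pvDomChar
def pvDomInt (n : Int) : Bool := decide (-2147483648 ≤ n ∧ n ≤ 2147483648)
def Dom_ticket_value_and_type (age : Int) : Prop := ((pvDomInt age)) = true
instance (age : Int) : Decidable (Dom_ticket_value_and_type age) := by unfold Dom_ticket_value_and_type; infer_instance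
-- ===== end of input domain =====

-- B replaces the first-match dict scan by branch-free rank arithmetic (sum of comparisons) indexing parallel tables.


-- ===== PORT A =====
-- the module-level ticket menu: (name, (precio, e_umbral)); none = float("inf")
def ticketMenu : List (String × (Int × Option Int)) :=
  [("Gratuita", (0, some 3)), ("Niños", (14, some 13)),
   ("Adultos", (23, some 65)), ("Jubilados", (18, none))]

-- age < threshold; a `none` threshold is float("inf"), so always true
def ltUmbral (age : Int) (u : Option Int) : Bool :=
  match u with
  | some t => age < t
  | none => true

-- the for-loop with break: walk the menu, keep the last-seen ticket_type
def ticketLoop (age : Int) (price : Int) (ty : String) :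
    List (String × (Int × Option Int)) → Int × String
  | [] => (price, ty)
  | (name, (p, u)) :: rest =>
      if ltUmbral age u then (p, name) else ticketLoop age price name rest

-- ticket_type starts as int 0; it is overwritten before any return on every input
-- (the last threshold is inf), so "" stands in for the initial 0 harmlessly
def ticket_value_and_type (age : Int) : Int × String :=
  ticketLoop age 0 "" ticketMenu

-- ===== PORT B =====
-- idx = (age >= 3) + (age >= 13) + (age >= 65): Python bools add as 0/1
def ticket_value_and_type_alt (age : Int) : Int × String :=
  let idx : Int :=
    (if age ≥ 3 then 1 else 0) + (if age ≥ 13 then 1 else 0) + (if age ≥ 65 then 1 else 0)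
  let prices : List Int := [0, 14, 23, 18]
  let names : List String := ["Gratuita", "Niños", "Adultos", "Jubilados"]
  ((PySem.List.pyGet? prices idx).getD 0, (PySem.List.pyGet? names idx).getD "")

-- ===== PRECONDITION & SPEC =====
def Spec_ticket_value_and_type (age : Int) (out : Int × String) : Prop := out = ticket_value_and_type_alt age
instance (age : Int) (out : Int × String) : Decidable (Spec_ticket_value_and_type age out) := by unfold Spec_ticket_value_and_type; infer_instance

-- ===== CLAIM =====
def Claim_equal_ticket_value_and_type : Prop := ∀ (age : Int), Dom_ticket_value_and_type age → Spec_ticket_value_and_type age (ticket_value_and_type age)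

-- ===== LEMMAS AND PROOFS =====

-- ===== VERDICT =====
theorem ticket_value_and_type_spec : Claim_equal_ticket_value_and_type := by
  intro age _
  unfold Spec_ticket_value_and_type ticket_value_and_type ticket_value_and_type_alt
  by_cases h1 : age < 3 <;> by_cases h2 : age < 13 <;> by_cases h3 : age < 65 <;>
    first
    | omega
    | simp [ticketLoop, ticketMenu, ltUmbral, PySem.List.pyGet?, PySem.List.pyIdx?,
        h1, h2, h3, show ¬ age ≥ 3 ↔ age < 3 by omega, show ¬ age ≥ 13 ↔ age < 13 by omega,
        show ¬ age ≥ 65 ↔ age < 65 by omega, show age ≥ 3 ↔ ¬ age < 3 by omega,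
        show age ≥ 13 ↔ ¬ age < 13 by omega, show age ≥ 65 ↔ ¬ age < 65 by omega]
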